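-- pv_equiv track=rewrite | github.com/Melodiz/dailycode | Yandex/yandex_tex/tmp.py | Solution
-- ===== SOURCE A (Python) =====
-- def Solution(points) -> bool:
--     min_x, max_x = float('inf'), float('-inf')
--     points_set = set()
--     for x, y in points:
--         min_x = min(min_x, x)
--         max_x = max(max_x, x)
--         points_set.add((x, y))
--     t2x0 = min_x+max_x
--     for x, y in points:
--         # check if there is a reflected point;
--         x_pair = t2x0-x
--         if (x_pair, y) not in points_set: return False
--     return True
-- ===== SOURCE B (Python) =====
-- def _pal(xs, axis):
--     # xs is a sorted list of distinct x-values; the row is symmetric about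
--     # axis/2 iff the two ends pair to axis and the interior is symmetric.
--     if not xs:
--         return True
--     if xs[0] + xs[-1] != axis:
--         return False
--     return _pal(xs[1:-1], axis)
--
-- def Solution(points) -> bool:
--     if not points:
--         return True
--     rows = {}
--     for x, y in points:
--         rows.setdefault(y, set()).add(x)
--     xs_all = [x for x, _ in points]
--     axis = min(xs_all) + max(xs_all)
--     return all(_pal(sorted(s), axis) for s in rows.values())
-- ===== Notes on version B (the rewrite author's own statement) =====
-- stated objective: alternative
-- what changed: Instead of one global point set probed for each point's mirror, B groups x-values by row into a dict of sets, sorts each row, and checks each sorted row is a palindrome about the axis by pairing the two ends recursively.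
import Mathlib
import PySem

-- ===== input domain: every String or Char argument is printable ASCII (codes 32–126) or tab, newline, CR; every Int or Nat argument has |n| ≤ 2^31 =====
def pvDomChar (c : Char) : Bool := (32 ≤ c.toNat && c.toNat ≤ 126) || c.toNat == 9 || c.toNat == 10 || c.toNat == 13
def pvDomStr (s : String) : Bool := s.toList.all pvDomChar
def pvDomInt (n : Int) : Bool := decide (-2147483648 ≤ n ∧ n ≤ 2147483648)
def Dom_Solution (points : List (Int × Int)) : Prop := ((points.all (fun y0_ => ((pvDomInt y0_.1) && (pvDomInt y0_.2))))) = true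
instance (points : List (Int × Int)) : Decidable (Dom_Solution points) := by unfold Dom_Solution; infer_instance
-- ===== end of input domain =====

-- B replaces A's global mirror-membership test by grouping x-values per row,
-- sorting each row and checking it as a palindrome about the axis (objective: alternative).

-- ===== PORT A =====
-- body of A's first loop: it maintains (min_x, max_x, points_set); the float ±inf seeds
-- become Option Int (none = still ±inf, which survives only on empty input, where t2x0 is unused)
def aStep (acc : Option Int × Option Int × PySem.Set (Int × Int)) (xy : Int × Int) :
    Option Int × Option Int × PySem.Set (Int × Int) :=
  (some (match acc.1 with | none => xy.1 | some m => min m xy.1),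
   some (match acc.2.1 with | none => xy.1 | some m => max m xy.1),
   PySem.Set.add acc.2.2 xy)

def Solution (points : List (Int × Int)) : Bool :=
  let st := points.foldl aStep (none, none, PySem.Set.empty)
  match st.1, st.2.1 with
  | some mn, some mx =>
      -- t2x0 = min_x + max_x; the second loop returns False at the first missing mirror point
      points.all (fun xy => PySem.Set.contains st.2.2 (mn + mx - xy.1, xy.2))
  | _, _ => true   -- empty input: the check loop never runs, return True

-- ===== PORT B =====
-- _pal: ends of the sorted row must pair to axis, interior recursively
def pal (axis : Int) : List Int → Bool
  | [] => true
  | x :: rest =>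
      if x + rest.getLastD x = axis then pal axis rest.dropLast else false
  termination_by xs => xs.length
  decreasing_by simp [List.length_dropLast]

def Solution_alt (points : List (Int × Int)) : Bool :=
  match points with
  | [] => true
  | _ :: _ =>
    -- rows: y ↦ set of x-values in that row (rows.setdefault(y, set()).add(x))
    let rows := points.foldl
      (fun d q => d.modify q.2 PySem.Set.empty (fun s => PySem.Set.add s q.1)) PySem.Dict.empty
    let xsAll := points.map (·.1)
    let axis := (PySem.List.min? xsAll (fun x => x)).getD 0 + (PySem.List.max? xsAll (fun x => x)).getD 0
    rows.values.all (fun s => pal axis (PySem.List.sorted s (fun x => x)))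

-- ===== PRECONDITION & SPEC =====
def Spec_Solution (points : List (Int × Int)) (out : Bool) : Prop := out = Solution_alt points
instance (points : List (Int × Int)) (out : Bool) : Decidable (Spec_Solution points out) := by unfold Spec_Solution; infer_instance

-- ===== CLAIM (what is proved, stated in full; the proofs are below) =====
def Claim_equal_Solution : Prop := ∀ (points : List (Int × Int)), Dom_Solution points → Spec_Solution points (Solution points)

-- ===== LEMMAS AND PROOFS =====

-- A-side fold: the three accumulators separately
lemma aStep_fold_set (l : List (Int × Int)) (acc : Option Int × Option Int × PySem.Set (Int × Int)) :
    (l.foldl aStep acc).2.2 = l.foldl PySem.Set.add acc.2.2 := by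
  induction l generalizing acc with
  | nil => rfl
  | cons p t ih => simp [List.foldl, ih, aStep]

lemma aStep_fold_min (l : List (Int × Int)) (m M : Int) (s : PySem.Set (Int × Int)) :
    (l.foldl aStep (some m, some M, s)).1 = some (l.foldl (fun a q => min a q.1) m) := by
  induction l generalizing m M s with
  | nil => rfl
  | cons p t ih => simp [List.foldl, aStep, ih]

lemma aStep_fold_max (l : List (Int × Int)) (m M : Int) (s : PySem.Set (Int × Int)) :
    (l.foldl aStep (some m, some M, s)).2.1 = some (l.foldl (fun a q => max a q.1) M) := by
  induction l generalizing m M s with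
  | nil => rfl
  | cons p t ih => simp [List.foldl, aStep, ih]

-- B-side fold: the row dict looked up at y is the set of x-values of the points with second component y
lemma rows_getD (l : List (Int × Int)) (d : PySem.Dict Int (PySem.Set Int)) (y : Int) :
    (l.foldl (fun d q => d.modify q.2 PySem.Set.empty (fun s => PySem.Set.add s q.1)) d).getD y PySem.Set.empty
      = ((l.filter (fun q => decide (q.2 = y))).map (·.1)).foldl PySem.Set.add (d.getD y PySem.Set.empty) := by
  induction l generalizing d with
  | nil => rfl
  | cons q t ih =>
    simp only [List.foldl_cons, ih, PySem.Dict.getD_modify, List.filter_cons]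
    by_cases h : q.2 = y
    · simp [h]
    · simp [h, Ne.symm h]

lemma mem_row (l : List (Int × Int)) (y x : Int) :
    (x ∈ (l.foldl (fun d q => d.modify q.2 PySem.Set.empty (fun s => PySem.Set.add s q.1)) PySem.Dict.empty).getD y PySem.Set.empty)
      ↔ (x, y) ∈ l := by
  rw [rows_getD, PySem.Dict.getD_empty, show (PySem.Set.empty : PySem.Set Int) = ([] : List Int) from rfl,
    ← PySem.Set.ofList_eq_foldl, PySem.Set.mem_ofList]
  constructor
  · intro h
    rcases List.mem_map.1 h with ⟨q, hq, rfl⟩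
    rcases List.mem_filter.1 hq with ⟨hql, hqy⟩
    have : q = (q.1, y) := by
      have := of_decide_eq_true hqy; exact Prod.ext rfl this
    rwa [← this]
  · intro h
    exact List.mem_map.2 ⟨(x, y), List.mem_filter.2 ⟨h, by simp⟩, rfl⟩

-- the row dict is the same fold as Solution_alt writes it
lemma row_eq_ofList (l : List (Int × Int)) (y : Int) :
    (l.foldl (fun d q => d.modify q.2 PySem.Set.empty (fun s => PySem.Set.add s q.1)) PySem.Dict.empty).getD y PySem.Set.empty
      = PySem.Set.ofList ((l.filter (fun q => decide (q.2 = y))).map (·.1)) := by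
  rw [rows_getD, PySem.Dict.getD_empty, show (PySem.Set.empty : PySem.Set Int) = ([] : List Int) from rfl,
    ← PySem.Set.ofList_eq_foldl]

-- core: on a strictly increasing list, the two-ends pairing check is exactly
-- closure under the reflection x ↦ axis - x
lemma pal_nil (axis : Int) : pal axis [] = true := pal.eq_1 axis

lemma pal_single (axis x : Int) : pal axis [x] = decide (x + x = axis) := by
  rw [pal.eq_2]; simp [pal_nil]

lemma pal_concat (axis x b : Int) (m : List Int) :
    pal axis (x :: (m ++ [b])) = (decide (x + b = axis) && pal axis m) := by
  rw [pal.eq_2, List.getLastD_eq_getLast?, List.getLast?_concat, List.dropLast_concat]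
  by_cases hb : x + b = axis <;> simp [hb]

theorem pal_iff (axis : Int) : ∀ xs : List Int, xs.Pairwise (· < ·) →
    (pal axis xs = true ↔ ∀ x ∈ xs, axis - x ∈ xs)
  | [], _ => by simp [pal_nil]
  | x :: rest, h => by
    rcases List.eq_nil_or_concat rest with rfl | ⟨m, b, hconc⟩
    · simp only [pal_single, List.mem_singleton, decide_eq_true_iff]
      constructor
      · intro hp z hz; subst hz; omega
      · intro hc; have := hc x rfl; omega
    · rw [List.concat_eq_append] at hconc
      subst hconc
      have hlen : m.length < (x :: (m ++ [b])).length := by simp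
      have hx : ∀ z ∈ m ++ [b], x < z := (List.pairwise_cons.1 h).1
      have hmb : (m ++ [b]).Pairwise (· < ·) := (List.pairwise_cons.1 h).2
      have hm : m.Pairwise (· < ·) := (List.pairwise_append.1 hmb).1
      have hltb : ∀ z ∈ m, z < b := fun z hz =>
        (List.pairwise_append.1 hmb).2.2 z hz b (List.mem_singleton_self b)
      have hxb : x < b := hx b (by simp)
      have ihm := pal_iff axis m hm
      rw [pal_concat, Bool.and_eq_true, decide_eq_true_iff]
      constructor
      · rintro ⟨haxis, hp⟩ z hz
        have hcl := ihm.1 hp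
        simp only [List.mem_cons, List.mem_append, List.not_mem_nil, or_false] at hz ⊢
        rcases hz with rfl | hz | rfl
        · right; right; omega
        · right; left; exact hcl z hz
        · left; omega
      · intro hc
        have h1 : axis - x ∈ x :: (m ++ [b]) := hc x (by simp)
        have h2 : axis - b ∈ x :: (m ++ [b]) := hc b (by simp)
        have hub : ∀ z ∈ x :: (m ++ [b]), z ≤ b := by
          intro z hz
          simp only [List.mem_cons, List.mem_append, List.not_mem_nil, or_false] at hz
          rcases hz with rfl | hz | rfl
          · omega
          · exact le_of_lt (hltb z hz)
          · exact le_refl _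
        have hlb : ∀ z ∈ x :: (m ++ [b]), x ≤ z := by
          intro z hz
          simp only [List.mem_cons, List.mem_append, List.not_mem_nil, or_false] at hz
          rcases hz with rfl | hz | rfl
          · exact le_refl _
          · exact le_of_lt (hx z (by simp [hz]))
          · omega
        have haxis : x + b = axis := by
          have := hub _ h1; have := hlb _ h2; omega
        refine ⟨haxis, ihm.2 ?_⟩
        intro z hz
        have hzc : axis - z ∈ x :: (m ++ [b]) := hc z (by simp [hz])
        have hz1 : x < axis - z := by have := hltb z hz; omega
        have hz2 : axis - z < b := by have := hx z (by simp [hz]); omega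
        simp only [List.mem_cons, List.mem_append, List.not_mem_nil, or_false] at hzc
        rcases hzc with he | hzm | he
        · omega
        · exact hzm
        · omega
  termination_by xs => xs.length

-- the closure statement transfers through any permutation (sorted row ↔ row)
lemma closure_perm {l1 l2 : List Int} (hp : l1.Perm l2) (axis : Int) :
    (∀ x ∈ l1, axis - x ∈ l1) ↔ (∀ x ∈ l2, axis - x ∈ l2) := by
  constructor <;> intro h x hx
  · exact (hp.mem_iff).1 (h x ((hp.mem_iff).2 hx))
  · exact (hp.symm.mem_iff).1 (h x ((hp.symm.mem_iff).2 hx))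

theorem solution_eq : ∀ points : List (Int × Int), Solution points = Solution_alt points
  | [] => rfl
  | p :: t => by
    have hstep : aStep (none, none, PySem.Set.empty) p
        = (some p.1, some p.1, PySem.Set.add PySem.Set.empty p) := rfl
    have hmin : ((p :: t).foldl aStep (none, none, PySem.Set.empty)).1
        = some (t.foldl (fun a q => min a q.1) p.1) := by
      rw [List.foldl_cons, hstep, aStep_fold_min]
    have hmax : ((p :: t).foldl aStep (none, none, PySem.Set.empty)).2.1
        = some (t.foldl (fun a q => max a q.1) p.1) := by
      rw [List.foldl_cons, hstep, aStep_fold_max]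
    have hset : ((p :: t).foldl aStep (none, none, PySem.Set.empty)).2.2
        = PySem.Set.ofList (p :: t) := by
      rw [List.foldl_cons, hstep, aStep_fold_set, PySem.Set.ofList_eq_foldl, List.foldl_cons]
      rfl
    have hminB : (PySem.List.min? ((p :: t).map (·.1)) (fun x => x)).getD 0
        = t.foldl (fun a q => min a q.1) p.1 := by
      rw [List.map_cons, PySem.List.min?_id_cons]
      simp [List.foldl_map]
    have hmaxB : (PySem.List.max? ((p :: t).map (·.1)) (fun x => x)).getD 0
        = t.foldl (fun a q => max a q.1) p.1 := by
      rw [List.map_cons, PySem.List.max?_id_cons]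
      simp [List.foldl_map]
    set axis := t.foldl (fun a q => min a q.1) p.1 + t.foldl (fun a q => max a q.1) p.1 with haxis
    set pts := p :: t with hpts
    set rows := pts.foldl
      (fun d q => d.modify q.2 PySem.Set.empty (fun s => PySem.Set.add s q.1)) PySem.Dict.empty with hrows
    have hA : Solution pts = pts.all (fun xy => PySem.Set.contains (PySem.Set.ofList pts) (axis - xy.1, xy.2)) := by
      simp only [Solution, hmin, hmax, hset]
      rfl
    have hkeys : rows.keys = PySem.Set.ofList (pts.map (fun q => q.2)) := by
      rw [hrows]
      have h0 := PySem.Dict.keys_foldl_modify_key (l := pts) (key := fun q : Int × Int => q.2)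
        (d0 := (PySem.Set.empty : PySem.Set Int))
        (f := fun _ q s => PySem.Set.add s q.1)
        (d := (PySem.Dict.empty : PySem.Dict Int (PySem.Set Int)))
      exact h0.trans (by rw [PySem.Set.ofList_eq_foldl]; rfl)
    have hnodup : rows.keys.Nodup := by
      rw [hkeys]; exact PySem.Set.nodup_ofList _
    have hvals : rows.values = rows.keys.map (fun k => rows.getD k PySem.Set.empty) := by
      unfold PySem.Dict.values
      rw [PySem.Dict.items_eq_map_keys rows hnodup PySem.Set.empty, List.map_map]
      rfl
    have hB : Solution_alt pts
        = (rows.keys.all (fun y => pal axis (PySem.List.sorted (rows.getD y PySem.Set.empty) (fun x => x)))) := by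
      conv_lhs => rw [hpts]
      simp only [Solution_alt]
      rw [← hpts, hminB, hmaxB, ← haxis, ← hrows, hvals, List.all_map]
      rfl
    rw [hA, hB, Bool.eq_iff_iff]
    simp only [List.all_eq_true, PySem.Set.contains_iff, PySem.Set.mem_ofList]
    constructor
    · -- A's closure ⇒ every row passes the palindrome check
      intro h y hy
      have hrow := row_eq_ofList pts y
      refine (pal_iff axis _ ?_).2 ?_
      · rw [hrows, hrow]; exact PySem.List.sorted_ofList_pairwise_lt _
      · refine (closure_perm (PySem.List.sorted_perm _ _ false) axis).2 ?_
        intro x hx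
        rw [hrows, mem_row] at hx ⊢
        exact h (x, y) hx
    · -- every row passes ⇒ A's closure
      intro h xy hxy
      have hy : xy.2 ∈ rows.keys := by
        rw [hkeys, PySem.Set.mem_ofList]
        exact List.mem_map.2 ⟨xy, hxy, rfl⟩
      have hcl := (pal_iff axis _ (by rw [hrows, row_eq_ofList]; exact PySem.List.sorted_ofList_pairwise_lt _)).1 (h xy.2 hy)
      have hcl' := (closure_perm (PySem.List.sorted_perm (rows.getD xy.2 PySem.Set.empty) (fun x => x) false) axis).1 hcl
      have hx : xy.1 ∈ rows.getD xy.2 PySem.Set.empty := by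
        rw [hrows, mem_row]; exact hxy
      have := hcl' xy.1 hx
      rw [hrows, mem_row] at this
      exact this

-- ===== VERDICT (by name: the statement is the Claim_ definition above) =====
theorem Solution_spec : Claim_equal_Solution := by
  intro points _
  unfold Spec_Solution
  exact solution_eq points
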